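-- pv_equiv track=rewrite | github.com/youngod2020/Algorithm | Plus_Minus.py | plusMinus
-- ===== SOURCE A (Python) =====
-- def plusMinus(arr):
--     pos = [x for x in arr if x > 0]
--     neg = [x for x in arr if x < 0]
--     zr = [x for x in arr if x == 0]
--
--     a = len(pos)/len(arr)
--     b = len(neg)/len(arr)
--     c = len(zr)/len(arr)
--
--     reuslt = '%.6f'%a,'%.6f'%b,'%.6f'%c
--
--     return reuslt
-- ===== SOURCE B (Python) =====
-- def _count_below(s, x):
--     # number of elements of the sorted list s that are < x (binary search)
--     lo, hi = 0, len(s)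
--     while lo < hi:
--         mid = (lo + hi) // 2
--         if s[mid] < x:
--             lo = mid + 1
--         else:
--             hi = mid
--     return lo
--
--
-- def _count_at_most(s, x):
--     # number of elements of the sorted list s that are <= x (binary search)
--     lo, hi = 0, len(s)
--     while lo < hi:
--         mid = (lo + hi) // 2
--         if s[mid] <= x:
--             lo = mid + 1
--         else:
--             hi = mid
--     return lo
--
--
-- def plusMinus(arr):
--     s = sorted(arr)
--     n = len(arr)
--     below = _count_below(s, 0)      # negatives
--     at_most = _count_at_most(s, 0)  # negatives + zeros
--     return '%.6f' % ((n - at_most) / n), '%.6f' % (below / n), '%.6f' % ((at_most - below) / n)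
-- ===== Notes on version B (the rewrite author's own statement) =====
-- stated objective: alternative
-- what changed: Instead of building three filtered lists, B sorts the array once and obtains the three counts from two hand-written binary searches for the boundaries of the zero block (elements < 0 and elements <= 0), deriving the positive count arithmetically.
import Mathlib
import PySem

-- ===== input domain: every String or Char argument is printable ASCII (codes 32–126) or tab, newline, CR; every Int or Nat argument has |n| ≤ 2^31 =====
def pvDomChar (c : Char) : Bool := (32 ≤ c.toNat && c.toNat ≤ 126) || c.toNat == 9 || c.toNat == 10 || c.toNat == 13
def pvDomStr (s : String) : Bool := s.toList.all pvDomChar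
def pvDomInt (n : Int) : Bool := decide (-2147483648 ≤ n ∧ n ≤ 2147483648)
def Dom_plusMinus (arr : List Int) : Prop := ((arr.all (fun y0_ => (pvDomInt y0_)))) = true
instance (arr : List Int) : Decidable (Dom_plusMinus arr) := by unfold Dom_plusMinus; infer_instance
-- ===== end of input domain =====

-- B sorts the array once and reads the three counts off two hand-written binary searches
-- for the boundaries of the zero block, instead of A's three filtered lists; same return value.


-- ===== PORT A =====
-- Shared background for both ports: a model of Python's `'%.6f' % (p/n)` for ints 0 ≤ p ≤ n,
-- n > 0 (both Pythons format exactly this builtin expression): p/n is rounded to the nearest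
-- IEEE-754 double (round-half-even, 53-bit significand), then that double is rounded half-even
-- to 6 decimals. Each port carries its own transcription of this model.

-- A side: round a/b (b > 0) to the nearest integer, ties to even — branch chain
def pvRhe (a b : Nat) : Nat :=
  let q := a / b
  let r := a % b
  if 2 * r < b then q
  else if b < 2 * r then q + 1
  else if q % 2 = 0 then q else q + 1

-- A side: smallest s with n ≤ p * 2^s (for 0 < p), by doubling p
def pvScale (p n : Nat) : Nat :=
  if p = 0 then 0
  else if h : n ≤ p then 0
  else pvScale (2 * p) n + 1
termination_by n - p
decreasing_by omega

-- A side: '%.6f' % (p/n)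
def pvFmt6 (p n : Nat) : String :=
  if p = 0 then "0.000000"
  else
    let s := pvScale p n
    let m := pvRhe (p * 2 ^ (52 + s)) n          -- 53-bit significand of the double p/n
    let k := pvRhe (m * 10 ^ 6) (2 ^ (52 + s))   -- that double rounded half-even to 6 decimals, times 10^6
    toString (k / 10 ^ 6) ++ "." ++ (toString (10 ^ 6 + k % 10 ^ 6)).drop 1

def plusMinus (arr : List Int) : String × String × String :=
  let pos := arr.filter (fun x => decide (x > 0))
  let neg := arr.filter (fun x => decide (x < 0))
  let zr := arr.filter (fun x => decide (x = 0))
  (pvFmt6 pos.length arr.length, pvFmt6 neg.length arr.length, pvFmt6 zr.length arr.length)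

-- ===== PORT B =====
-- B side: round a/b half-even, as quotient plus a 0/1 correction term
def altRhe (a b : Nat) : Nat :=
  a / b + (if b < 2 * (a % b) ∨ (2 * (a % b) = b ∧ a / b % 2 = 1) then 1 else 0)

-- B side: smallest s with n ≤ p * 2^s (for 0 < p), by halving n upwards
def altScale (p n : Nat) : Nat :=
  if n ≤ max p 1 then 0 else altScale p ((n + 1) / 2) + 1
termination_by n
decreasing_by omega

-- B side: '%.6f' % (p/n)
def altFmt (p n : Nat) : String :=
  let s := altScale p n
  let m := altRhe (p <<< (52 + s)) n
  let k := altRhe (m * 1000000) (1 <<< (52 + s))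
  if p = 0 then "0.000000"
  else toString (k / 1000000) ++ "." ++ (toString (1000000 + k % 1000000)).drop 1

-- B side: _count_below — number of elements of sorted s that are < x (binary search)
def altCountBelow (s : List Int) (x : Int) (lo hi : Nat) : Nat :=
  if lo < hi then
    if PySem.List.pyGetD s (((lo + hi) / 2 : Nat) : Int) 0 < x
    then altCountBelow s x ((lo + hi) / 2 + 1) hi
    else altCountBelow s x lo ((lo + hi) / 2)
  else lo
termination_by hi - lo
decreasing_by all_goals omega

-- B side: _count_at_most — number of elements of sorted s that are ≤ x (binary search)
def altCountAtMost (s : List Int) (x : Int) (lo hi : Nat) : Nat :=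
  if lo < hi then
    if PySem.List.pyGetD s (((lo + hi) / 2 : Nat) : Int) 0 ≤ x
    then altCountAtMost s x ((lo + hi) / 2 + 1) hi
    else altCountAtMost s x lo ((lo + hi) / 2)
  else lo
termination_by hi - lo
decreasing_by all_goals omega

def plusMinus_alt (arr : List Int) : String × String × String :=
  let s := PySem.List.sorted arr (fun y => y) false
  let n := arr.length
  let below := altCountBelow s 0 0 s.length
  let atMost := altCountAtMost s 0 0 s.length
  (altFmt (n - atMost) n, altFmt below n, altFmt (atMost - below) n)

-- ===== PRECONDITION & SPEC =====
-- Python A raises ZeroDivisionError on the empty list (len(arr) is the divisor); B raises there too.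
def Pre_plusMinus (arr : List Int) : Prop := arr ≠ []
instance (arr : List Int) : Decidable (Pre_plusMinus arr) := by unfold Pre_plusMinus; infer_instance
def pvWitness_plusMinus : List Int := [3, -2, 0, 7]

def Spec_plusMinus (arr : List Int) (out : String × String × String) : Prop := out = plusMinus_alt arr
instance (arr : List Int) (out : String × String × String) : Decidable (Spec_plusMinus arr out) := by unfold Spec_plusMinus; infer_instance

-- ===== CLAIM (what is proved, stated in full; the proofs are below) =====
def Claim_equal_plusMinus : Prop := ∀ (arr : List Int), Dom_plusMinus arr → Pre_plusMinus arr → Spec_plusMinus arr (plusMinus arr)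

-- ===== LEMMAS AND PROOFS =====

-- the two half-even roundings agree
theorem altRhe_eq (a b : Nat) : altRhe a b = pvRhe a b := by
  have hab : b * (a / b) + a % b = a := Nat.div_add_mod a b
  have hr : b = 0 ∨ a % b < b := by
    rcases Nat.eq_zero_or_pos b with h | h
    · exact Or.inl h
    · exact Or.inr (Nat.mod_lt _ h)
  unfold altRhe pvRhe
  dsimp only
  generalize a / b = q at *
  generalize a % b = r at *
  split_ifs <;> omega

-- minimality spec of A's scale
theorem pvScale_spec (n : Nat) : ∀ p, 1 ≤ p →
    n ≤ p * 2 ^ pvScale p n ∧ ∀ t, n ≤ p * 2 ^ t → pvScale p n ≤ t := by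
  intro p
  induction p using pvScale.induct (n := n) with
  | case1 => intro hp; omega
  | case2 p h h2 =>
    intro hp
    rw [pvScale]
    simp only [if_neg (by omega : ¬ p = 0), dif_pos h2]
    exact ⟨by simpa using h2, fun t _ => Nat.zero_le t⟩
  | case3 p h h2 ih =>
    intro hp
    rcases ih (by omega) with ⟨hle, hmin⟩
    rw [pvScale]
    simp only [if_neg (by omega : ¬ p = 0), dif_neg h2]
    constructor
    · calc n ≤ 2 * p * 2 ^ pvScale (2 * p) n := hle
        _ = p * 2 ^ (pvScale (2 * p) n + 1) := by ring
    · intro t ht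
      match t with
      | 0 => simp at ht; omega
      | t' + 1 =>
        have : n ≤ 2 * p * 2 ^ t' := by
          calc n ≤ p * 2 ^ (t' + 1) := ht
            _ = 2 * p * 2 ^ t' := by ring
        have := hmin t' this
        omega

-- minimality spec of B's scale
theorem altScale_spec (p : Nat) (hp : 1 ≤ p) : ∀ n,
    n ≤ p * 2 ^ altScale p n ∧ ∀ t, n ≤ p * 2 ^ t → altScale p n ≤ t := by
  intro n
  induction n using altScale.induct (p := p) with
  | case1 n h =>
    rw [altScale, if_pos h]
    exact ⟨by simp; omega, fun t _ => Nat.zero_le t⟩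
  | case2 n h ih =>
    rcases ih with ⟨hle, hmin⟩
    rw [altScale, if_neg h]
    constructor
    · have h2 : n ≤ 2 * ((n + 1) / 2) := by omega
      calc n ≤ 2 * ((n + 1) / 2) := h2
        _ ≤ 2 * (p * 2 ^ altScale p ((n + 1) / 2)) := by omega
        _ = p * 2 ^ (altScale p ((n + 1) / 2) + 1) := by ring
    · intro t ht
      match t with
      | 0 => simp at ht; omega
      | t' + 1 =>
        have hm : (n + 1) / 2 ≤ p * 2 ^ t' := by
          have : n ≤ 2 * (p * 2 ^ t') := by
            calc n ≤ p * 2 ^ (t' + 1) := ht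
              _ = 2 * (p * 2 ^ t') := by ring
          omega
        have := hmin t' hm
        omega

theorem altScale_eq (p n : Nat) (hp : 1 ≤ p) : altScale p n = pvScale p n := by
  rcases pvScale_spec n p hp with ⟨ha, hamin⟩
  rcases altScale_spec p hp n with ⟨hb, hbmin⟩
  exact Nat.le_antisymm (hbmin _ ha) (hamin _ hb)

-- the two formatters agree
theorem altFmt_eq (p n : Nat) : altFmt p n = pvFmt6 p n := by
  unfold altFmt pvFmt6
  by_cases hp : p = 0
  · simp [hp]
  · simp only [if_neg hp, Nat.shiftLeft_eq, altScale_eq p n (by omega), altRhe_eq, one_mul]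
    norm_num

-- a predicate that is a prefix property of a list has countP equal to the prefix length
theorem countP_boundary (p : Int → Bool) (s : List Int) (j : Nat) (hj : j ≤ s.length)
    (h1 : ∀ i, (h : i < s.length) → i < j → p s[i])
    (h2 : ∀ i, (h : i < s.length) → j ≤ i → ¬ p s[i]) :
    s.countP p = j := by
  induction s generalizing j with
  | nil => simpa using hj.antisymm (Nat.zero_le j) |>.symm
  | cons a t ih =>
    match j with
    | 0 =>
      have ha : ¬ p a := h2 0 (by simp) (by omega)
      rw [List.countP_cons_of_neg (by simpa using ha)]
      exact ih 0 (by omega) (by omega)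
        (fun i h hi => by simpa using h2 (i + 1) (by simpa using h) (by omega))
    | j' + 1 =>
      have ha : p a := h1 0 (by simp) (by omega)
      rw [List.countP_cons_of_pos (by simpa using ha)]
      have := ih j' (by simpa using hj)
        (fun i h hi => by simpa using h1 (i + 1) (by simpa using h) (by omega))
        (fun i h hi => by simpa using h2 (i + 1) (by simpa using h) (by omega))
      omega

-- the binary search for `< x` counts the elements below x in a sorted list
theorem altCountBelow_correct (s : List Int) (x : Int) (hs : s.Pairwise (· ≤ ·)) :
    ∀ k lo hi, hi - lo = k → lo ≤ hi → hi ≤ s.length →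
    (∀ i, (h : i < s.length) → i < lo → s[i] < x) →
    (∀ i, (h : i < s.length) → hi ≤ i → x ≤ s[i]) →
    altCountBelow s x lo hi = s.countP (fun y => decide (y < x)) := by
  have hmono : ∀ i j, (hi : i < s.length) → (hj : j < s.length) → i ≤ j → s[i] ≤ s[j] := by
    intro i j hi hj hij
    rcases Nat.eq_or_lt_of_le hij with h | h
    · subst h; exact le_refl _
    · exact (List.pairwise_iff_getElem.mp hs) i j hi hj h
  intro k
  induction k using Nat.strong_induction_on with
  | _ k ih =>
    intro lo hi hk hlh hhi hlow hhigh
    rw [altCountBelow]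
    by_cases hlt : lo < hi
    · rw [if_pos hlt]
      have hmid : (lo + hi) / 2 < s.length := by omega
      rw [PySem.List.pyGetD_natCast, List.getD_eq_getElem?_getD, List.getElem?_eq_getElem hmid]
      simp only [Option.getD_some]
      by_cases hc : s[(lo + hi) / 2] < x
      · rw [if_pos hc]
        exact ih (hi - ((lo + hi) / 2 + 1)) (by omega) _ _ rfl (by omega) hhi
          (fun i h hi' => lt_of_le_of_lt (hmono i ((lo + hi) / 2) h hmid (by omega)) hc)
          hhigh
      · rw [if_neg hc]
        exact ih ((lo + hi) / 2 - lo) (by omega) _ _ rfl (by omega) (by omega) hlow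
          (fun i h hi' => le_trans (not_lt.mp hc) (hmono ((lo + hi) / 2) i hmid h hi'))
    · rw [if_neg hlt]
      have hj : lo = hi := by omega
      subst hj
      exact (countP_boundary _ s lo hhi
        (fun i h hi' => by simpa using hlow i h hi')
        (fun i h hi' => by simpa using hhigh i h hi')).symm

-- the binary search for `≤ x` counts the elements at most x in a sorted list
theorem altCountAtMost_correct (s : List Int) (x : Int) (hs : s.Pairwise (· ≤ ·)) :
    ∀ k lo hi, hi - lo = k → lo ≤ hi → hi ≤ s.length →
    (∀ i, (h : i < s.length) → i < lo → s[i] ≤ x) →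
    (∀ i, (h : i < s.length) → hi ≤ i → x < s[i]) →
    altCountAtMost s x lo hi = s.countP (fun y => decide (y ≤ x)) := by
  have hmono : ∀ i j, (hi : i < s.length) → (hj : j < s.length) → i ≤ j → s[i] ≤ s[j] := by
    intro i j hi hj hij
    rcases Nat.eq_or_lt_of_le hij with h | h
    · subst h; exact le_refl _
    · exact (List.pairwise_iff_getElem.mp hs) i j hi hj h
  intro k
  induction k using Nat.strong_induction_on with
  | _ k ih =>
    intro lo hi hk hlh hhi hlow hhigh
    rw [altCountAtMost]
    by_cases hlt : lo < hi
    · rw [if_pos hlt]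
      have hmid : (lo + hi) / 2 < s.length := by omega
      rw [PySem.List.pyGetD_natCast, List.getD_eq_getElem?_getD, List.getElem?_eq_getElem hmid]
      simp only [Option.getD_some]
      by_cases hc : s[(lo + hi) / 2] ≤ x
      · rw [if_pos hc]
        exact ih (hi - ((lo + hi) / 2 + 1)) (by omega) _ _ rfl (by omega) hhi
          (fun i h hi' => le_trans (hmono i ((lo + hi) / 2) h hmid (by omega)) hc)
          hhigh
      · rw [if_neg hc]
        exact ih ((lo + hi) / 2 - lo) (by omega) _ _ rfl (by omega) (by omega) hlow
          (fun i h hi' => lt_of_lt_of_le (not_le.mp hc) (hmono ((lo + hi) / 2) i hmid h hi'))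
    · rw [if_neg hlt]
      have hj : lo = hi := by omega
      subst hj
      exact (countP_boundary _ s lo hhi
        (fun i h hi' => by simpa using hlow i h hi')
        (fun i h hi' => by simpa using hhigh i h hi')).symm

-- the three sign counts partition the length
theorem counts_partition (l : List Int) :
    l.countP (fun y => decide (y ≤ 0)) =
      l.countP (fun y => decide (y < 0)) + l.countP (fun y => decide (y = 0)) ∧
    l.countP (fun y => decide (y ≤ 0)) + l.countP (fun y => decide (0 < y)) = l.length := by
  induction l with
  | nil => simp
  | cons a t ih =>
    simp only [List.countP_cons, List.length_cons]
    rcases lt_trichotomy a 0 with h | h | h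
    · simp only [decide_eq_true_eq]
      rw [if_pos (le_of_lt h), if_pos h, if_neg (ne_of_lt h), if_neg (not_lt.mpr (le_of_lt h))]
      omega
    · subst h
      simp only [decide_eq_true_eq, lt_irrefl, if_false, if_pos (le_refl (0 : Int)), if_true, decide_true]
      omega
    · simp only [decide_eq_true_eq]
      rw [if_neg (not_le.mpr h), if_neg (not_lt.mpr (le_of_lt h)), if_neg (ne_of_gt h), if_pos h]
      omega

-- ===== VERDICT (by name: the statement is the Claim_ definition above) =====
theorem plusMinus_spec : Claim_equal_plusMinus := by
  intro arr _ _
  unfold Spec_plusMinus plusMinus plusMinus_alt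
  have hperm : (PySem.List.sorted arr (fun y => y) false).Perm arr := PySem.List.sorted_perm arr (fun y => y) false
  have hpair : (PySem.List.sorted arr (fun y => y) false).Pairwise (· ≤ ·) := by
    simpa using PySem.List.sorted_pairwise (xs := arr) (key := fun y => y)
  set s := PySem.List.sorted arr (fun y => y) false with hs
  have hlen : s.length = arr.length := hperm.length_eq
  have hbelow : altCountBelow s 0 0 s.length = s.countP (fun y => decide (y < 0)) :=
    altCountBelow_correct s 0 hpair (s.length - 0) 0 s.length rfl (by omega) (le_refl _)
      (fun i h hi => by omega) (fun i h hi => by omega)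
  have hatMost : altCountAtMost s 0 0 s.length = s.countP (fun y => decide (y ≤ 0)) :=
    altCountAtMost_correct s 0 hpair (s.length - 0) 0 s.length rfl (by omega) (le_refl _)
      (fun i h hi => by omega) (fun i h hi => by omega)
  have hc1 : s.countP (fun y => decide (y < 0)) = arr.countP (fun y => decide (y < 0)) :=
    hperm.countP_eq _
  have hc2 : s.countP (fun y => decide (y ≤ 0)) = arr.countP (fun y => decide (y ≤ 0)) :=
    hperm.countP_eq _
  rcases counts_partition arr with ⟨hz, hp⟩
  simp only [altFmt_eq, hbelow, hatMost, hc1, hc2]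
  have hf1 : (arr.filter (fun x => decide (x > 0))).length = arr.countP (fun y => decide (0 < y)) := by
    exact (List.countP_eq_length_filter).symm
  have hf2 : (arr.filter (fun x => decide (x < 0))).length = arr.countP (fun y => decide (y < 0)) := by
    exact (List.countP_eq_length_filter).symm
  have hf3 : (arr.filter (fun x => decide (x = 0))).length = arr.countP (fun y => decide (y = 0)) := by
    exact (List.countP_eq_length_filter).symm
  refine Prod.ext ?_ (Prod.ext ?_ ?_) <;> simp only []
  · rw [hf1, show arr.length - arr.countP (fun y => decide (y ≤ 0)) = arr.countP (fun y => decide (0 < y)) from by omega]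
  · rw [hf2]
  · rw [hf3, show arr.countP (fun y => decide (y ≤ 0)) - arr.countP (fun y => decide (y < 0)) = arr.countP (fun y => decide (y = 0)) from by omega]
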